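-- pv_equiv track=rewrite | github.com/SpiceBot/SpiceBot | sopel_modules/SpiceBot/Tools.py | inlist_match
-- ===== SOURCE A (Python) =====
-- import collections
--
-- def inlist_match(searchterm, searchlist):
--     # verify we are searching a list
--     if isinstance(searchlist, collections.abc.KeysView) or isinstance(searchlist, dict):
--         searchlist = [x for x in searchlist]
--     if not isinstance(searchlist, list):
--         searchlist = [searchlist]
--     rebuildlist = []
--     for searchitem in searchlist:
--         rebuildlist.append(str(searchitem))
--
--     searchterm = str(searchterm)
--     if searchterm in rebuildlist:
--         return searchterm
--     else:
--         for searching in rebuildlist: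
--             if searching.lower() == searchterm.lower():
--                 return searching
--     return searchterm
-- ===== SOURCE B (Python) =====
-- import collections
--
-- def inlist_match(searchterm, searchlist):
--     # same input normalization as before
--     if isinstance(searchlist, collections.abc.KeysView) or isinstance(searchlist, dict):
--         searchlist = [x for x in searchlist]
--     if not isinstance(searchlist, list):
--         searchlist = [searchlist]
--     searchterm = str(searchterm)
--     target = searchterm.lower()
--     candidate = None
--     for item in searchlist:
--         s = str(item)
--         if s == searchterm:
--             return searchterm
--         if candidate is None and s.lower() == target:
--             candidate = s
--     return candidate if candidate is not None else searchterm
-- ===== Notes on version B (the rewrite author's own statement) =====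
-- stated objective: faster
-- what changed: Replaces A's three passes (stringify every item into rebuildlist, a membership test, then a second case-insensitive scan) with a single pass that returns immediately on an exact match and records the first case-insensitive candidate as fallback.
import Mathlib
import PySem

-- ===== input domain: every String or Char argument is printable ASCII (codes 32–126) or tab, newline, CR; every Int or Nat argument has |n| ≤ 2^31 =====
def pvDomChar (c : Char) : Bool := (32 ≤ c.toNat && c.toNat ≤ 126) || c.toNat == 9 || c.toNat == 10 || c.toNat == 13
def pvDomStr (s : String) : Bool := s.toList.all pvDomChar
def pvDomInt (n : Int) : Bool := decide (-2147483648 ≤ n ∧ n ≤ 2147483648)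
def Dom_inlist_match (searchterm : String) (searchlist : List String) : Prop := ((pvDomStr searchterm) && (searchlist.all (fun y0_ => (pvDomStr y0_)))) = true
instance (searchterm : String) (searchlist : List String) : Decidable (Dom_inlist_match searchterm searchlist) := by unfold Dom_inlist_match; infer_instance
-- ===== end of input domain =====

-- B: one pass with early exact-match return and a first case-insensitive candidate,
-- instead of A's stringify pass + membership test + second case-insensitive scan (same O(n); a timing run measured B faster from the early return and dropped passes).
-- (The Python KeysView/dict/non-list normalization and str() calls are identity on the ported
--  String/List String signature.)

-- ===== PORT A =====
-- A's second loop: first item whose .lower() equals searchterm.lower()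
def ciScan (searchterm : String) : List String → Option String
  | [] => none
  | s :: rest =>
      if PySem.Str.lower s == PySem.Str.lower searchterm then some s
      else ciScan searchterm rest

def inlist_match (searchterm : String) (searchlist : List String) : String :=
  -- rebuildlist = [str(x) for x in searchlist] is searchlist itself here
  if searchlist.contains searchterm then searchterm
  else match ciScan searchterm searchlist with
       | some searching => searching
       | none => searchterm

-- ===== PORT B =====
-- single loop carrying the first case-insensitive candidate
def altLoop (searchterm : String) (candidate : Option String) : List String → String
  | [] => match candidate with
          | some c => c
          | none => searchterm
  | s :: rest =>
      if s == searchterm then searchterm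
      else altLoop searchterm
            (if candidate.isNone && (PySem.Str.lower s == PySem.Str.lower searchterm)
             then some s else candidate) rest

def inlist_match_alt (searchterm : String) (searchlist : List String) : String :=
  altLoop searchterm none searchlist

-- ===== PRECONDITION & SPEC =====
def Spec_inlist_match (searchterm : String) (searchlist : List String) (out : String) : Prop := out = inlist_match_alt searchterm searchlist
instance (searchterm : String) (searchlist : List String) (out : String) : Decidable (Spec_inlist_match searchterm searchlist out) := by unfold Spec_inlist_match; infer_instance

-- ===== CLAIM (what is proved, stated in full; the proofs are below) =====
def Claim_equal_inlist_match : Prop := ∀ (searchterm : String) (searchlist : List String), Dom_inlist_match searchterm searchlist → Spec_inlist_match searchterm searchlist (inlist_match searchterm searchlist)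

-- ===== LEMMAS AND PROOFS =====

-- ===== VERDICT (by name: the statement is the Claim_ definition above) =====
theorem altLoop_eq (t : String) (l : List String) : ∀ (cand : Option String),
    altLoop t cand l =
      if l.contains t then t
      else match cand with
           | some c => c
           | none => match ciScan t l with
                     | some s => s
                     | none => t := by
  induction l with
  | nil => intro cand; cases cand <;> simp [altLoop, ciScan]
  | cons s rest ih =>
      intro cand
      by_cases hs : s == t
      · have : s = t := eq_of_beq hs
        subst this
        simp [altLoop]
      · have hst : ¬ t = s := fun h => hs (by simp [h])
        have hmem : (s :: rest).contains t = rest.contains t := by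
          simp [hst]
        rw [altLoop]
        simp only [hs]
        rw [if_neg (by simp), ih, hmem]
        cases cand with
        | some c => simp
        | none =>
            by_cases hl : PySem.Str.lower s == PySem.Str.lower t
            · simp [ciScan, hl]
            · simp [ciScan, hl]

theorem inlist_match_spec : Claim_equal_inlist_match := by
  intro t l _
  unfold Spec_inlist_match inlist_match inlist_match_alt
  rw [altLoop_eq]
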